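-- pv_equiv track=rewrite | github.com/rtviii/riboxyz | ribctl/lib/libseq.py | highlight_indices
-- ===== SOURCE A (Python) =====
-- from typing import List
--
-- def highlight_indices(sequence: str, ixs: List[int], color: int = 91):
--     """Highlight indices"""
--     CRED = "\033[{}m".format(color)
--     CEND = "\033[0m"
--     _ = ""
--     for i, v in enumerate(sequence):
--         if i in ixs:
--             _ += CRED + v + CEND
--         else:
--             _ += v
--     return _
-- ===== SOURCE B (Python) =====
-- def highlight_indices(sequence, ixs, color=91):
--     """Highlight indices"""
--     CRED = "\033[{}m".format(color)
--     CEND = "\033[0m"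
--     n = len(sequence)
--     pieces = []
--     prev = 0
--     for i in sorted(set(ixs)):
--         if 0 <= i < n:
--             pieces.append(sequence[prev:i])
--             pieces.append(CRED + sequence[i] + CEND)
--             prev = i + 1
--     pieces.append(sequence[prev:])
--     return "".join(pieces)
-- ===== Notes on version B (the rewrite author's own statement) =====
-- stated objective: faster
-- what changed: Instead of scanning every character and testing `i in ixs` with a linear list scan, B sorts the deduplicated indices and concatenates untouched slices between consecutive in-range highlight positions, visiting only the highlighted positions.
import Mathlib
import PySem

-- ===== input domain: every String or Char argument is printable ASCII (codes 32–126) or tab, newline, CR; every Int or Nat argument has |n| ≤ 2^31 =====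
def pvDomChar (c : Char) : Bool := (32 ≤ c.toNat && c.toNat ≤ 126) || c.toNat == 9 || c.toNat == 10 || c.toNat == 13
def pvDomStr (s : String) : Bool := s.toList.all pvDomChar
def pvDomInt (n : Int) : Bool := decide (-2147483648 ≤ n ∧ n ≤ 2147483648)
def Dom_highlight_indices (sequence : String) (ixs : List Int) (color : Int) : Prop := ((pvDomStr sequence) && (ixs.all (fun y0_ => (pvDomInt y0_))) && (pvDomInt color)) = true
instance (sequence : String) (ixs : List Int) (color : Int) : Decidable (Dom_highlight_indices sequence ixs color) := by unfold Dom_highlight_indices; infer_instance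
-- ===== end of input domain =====

-- B visits only the sorted deduplicated in-range highlight indices and concatenates untouched
-- slices between them instead of scanning every character and testing membership; faster when
-- few positions are highlighted.

-- ===== PORT A =====
def highlight_indices (sequence : String) (ixs : List Int) (color : Int) : String :=
  let cred : List Char := '\x1b' :: '[' :: (PySem.Int.toChars color ++ ['m'])
  let cend : List Char := ['\x1b', '[', '0', 'm']
  String.ofList ((PySem.List.enumerate sequence.toList 0).foldl
    (fun acc p => if p.1 ∈ ixs then acc ++ cred ++ [p.2] ++ cend else acc ++ [p.2]) [])

-- ===== PORT B =====
def highlight_indices_alt (sequence : String) (ixs : List Int) (color : Int) : String :=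
  let cred : List Char := '\x1b' :: '[' :: (PySem.Int.toChars color ++ ['m'])
  let cend : List Char := ['\x1b', '[', '0', 'm']
  let l := sequence.toList
  let n : Int := l.length
  let st := (PySem.List.sorted (PySem.Set.ofList ixs) (fun x => x) false).foldl
    (fun (st : List (List Char) × Int) i =>
      if 0 ≤ i ∧ i < n then
        (st.1 ++ [PySem.List.slice l (some st.2) (some i),
                  cred ++ [(PySem.List.pyGet? l i).getD ' '] ++ cend], i + 1)
      else st)
    ([], 0)
  String.ofList (st.1 ++ [PySem.List.slice l (some st.2) none]).flatten

-- ===== PRECONDITION & SPEC =====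
def Spec_highlight_indices (sequence : String) (ixs : List Int) (color : Int) (out : String) : Prop := out = highlight_indices_alt sequence ixs color
instance (sequence : String) (ixs : List Int) (color : Int) (out : String) : Decidable (Spec_highlight_indices sequence ixs color out) := by unfold Spec_highlight_indices; infer_instance

-- ===== CLAIM (what is proved, stated in full; the proofs are below) =====
def Claim_equal_highlight_indices : Prop := ∀ (sequence : String) (ixs : List Int) (color : Int), Dom_highlight_indices sequence ixs color → Spec_highlight_indices sequence ixs color (highlight_indices sequence ixs color)

-- ===== LEMMAS AND PROOFS =====

/-- Proof-side canonical form: the per-character chunks, index running from `s`. -/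
def hiBuild (M : List Int) (cr ce : List Char) : List Char → Int → List (List Char)
  | [], _ => []
  | c :: cs, s => (if s ∈ M then cr ++ [c] ++ ce else [c]) :: hiBuild M cr ce cs (s + 1)

/-- A's loop equals the flattened canonical form. -/
lemma foldA_eq (M : List Int) (cr ce : List Char) (l : List Char) (s : Int) (acc : List Char) :
    (PySem.List.enumerate l s).foldl
        (fun acc p => if p.1 ∈ M then acc ++ cr ++ [p.2] ++ ce else acc ++ [p.2]) acc
      = acc ++ (hiBuild M cr ce l s).flatten := by
  induction l generalizing s acc with
  | nil => simp [PySem.List.enumerate_nil, hiBuild]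
  | cons c cs ih =>
    rw [PySem.List.enumerate_cons]
    simp only [List.foldl_cons, hiBuild, List.flatten_cons]
    rw [ih]
    split <;> simp [List.append_assoc]

/-- hiBuild only looks at membership of the indices it actually visits. -/
lemma hiBuild_congr (M M' : List Int) (cr ce : List Char) (l : List Char) (s : Int)
    (h : ∀ t : Int, s ≤ t → t < s + l.length → (t ∈ M ↔ t ∈ M')) :
    hiBuild M cr ce l s = hiBuild M' cr ce l s := by
  induction l generalizing s with
  | nil => rfl
  | cons c cs ih =>
    simp only [hiBuild]
    have hs : s ∈ M ↔ s ∈ M' := h s le_rfl (by simp)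
    congr 1
    · by_cases hm : s ∈ M
      · rw [if_pos hm, if_pos (hs.mp hm)]
      · rw [if_neg hm, if_neg (fun hm' => hm (hs.mpr hm'))]
    · exact ih (s + 1) (fun t h1 h2 => h t (by omega) (by simp at h2 ⊢; omega))

/-- An unhighlighted stretch flattens to the characters themselves. -/
lemma hiBuild_flatten_not_mem (M : List Int) (cr ce : List Char) (l : List Char) (s : Int)
    (h : ∀ t : Int, s ≤ t → t < s + l.length → t ∉ M) :
    (hiBuild M cr ce l s).flatten = l := by
  induction l generalizing s with
  | nil => rfl
  | cons c cs ih =>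
    simp only [hiBuild, List.flatten_cons]
    rw [if_neg (h s le_rfl (by simp))]
    simp only [List.singleton_append, List.cons.injEq, true_and]
    exact ih (s + 1) (fun t h1 h2 => h t (by omega) (by simp at h2 ⊢; omega))

/-- Split the canonical form at a position `q` below which nothing from `M` occurs. -/
lemma hiBuild_flatten_split (M : List Int) (cr ce : List Char) (l : List Char) :
    ∀ (d p q : Nat), q = p + d → q ≤ l.length →
    (∀ s : Nat, p ≤ s → s < q → ((s : Int) ∉ M)) →
    (hiBuild M cr ce (l.drop p) p).flatten
      = (l.drop p).take (q - p) ++ (hiBuild M cr ce (l.drop q) q).flatten := by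
  intro d
  induction d with
  | zero => intro p q hq _ _; subst hq; simp
  | succ d ih =>
    intro p q hq hlen hnm
    have hp : p < l.length := by omega
    rw [List.drop_eq_getElem_cons hp]
    simp only [hiBuild, List.flatten_cons]
    rw [if_neg (hnm p le_rfl (by omega))]
    have := ih (p + 1) q (by omega) hlen (fun s h1 h2 => hnm s (by omega) h2)
    push_cast at this ⊢
    rw [this]
    have htake : q - p = (q - (p + 1)) + 1 := by omega
    rw [htake, List.take_succ_cons]
    simp

/-- B's fold over a strictly increasing index list produces the canonical form from `p` on. -/
lemma foldB_core (cr ce : List Char) (l : List Char) (L : List Int) :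
    L.Pairwise (· < ·) →
    ∀ (p : Nat) (acc : List (List Char)),
    (∀ i ∈ L, 0 ≤ i → (p : Int) ≤ i) → p ≤ l.length →
    ((L.foldl (fun (st : List (List Char) × Int) i =>
        if 0 ≤ i ∧ i < (l.length : Int) then
          (st.1 ++ [PySem.List.slice l (some st.2) (some i),
                    cr ++ [(PySem.List.pyGet? l i).getD ' '] ++ ce], i + 1)
        else st) (acc, (p : Int))).1
      ++ [PySem.List.slice l
            (some (L.foldl (fun (st : List (List Char) × Int) i =>
        if 0 ≤ i ∧ i < (l.length : Int) then
          (st.1 ++ [PySem.List.slice l (some st.2) (some i),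
                    cr ++ [(PySem.List.pyGet? l i).getD ' '] ++ ce], i + 1)
        else st) (acc, (p : Int))).2) none]).flatten
      = acc.flatten ++ (hiBuild L cr ce (l.drop p) p).flatten := by
  induction L with
  | nil =>
    intro _ p acc _ hp
    simp only [List.foldl_nil]
    rw [PySem.List.slice_from_natCast]
    rw [hiBuild_flatten_not_mem _ _ _ _ _ (by simp)]
    simp
  | cons i L ih =>
    intro hP p acc hge hp
    rcases List.pairwise_cons.mp hP with ⟨hiL, hP'⟩
    simp only [List.foldl_cons]
    by_cases hg : 0 ≤ i ∧ i < (l.length : Int)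
    · rw [if_pos hg]
      obtain ⟨h0, hlt⟩ := hg
      have hpi : (p : Int) ≤ i := hge i (List.mem_cons_self ..) h0
      set q : Nat := i.toNat with hq
      have hiq : i = (q : Int) := by omega
      have hqlen : q < l.length := by omega
      have hpq : p ≤ q := by omega
      have hstep : i + 1 = ((q + 1 : Nat) : Int) := by omega
      rw [hstep]
      rw [ih hP' (q + 1)
        (acc ++ [PySem.List.slice l (some (p : Int)) (some i),
                 cr ++ [(PySem.List.pyGet? l i).getD ' '] ++ ce])
        (fun j hj _ => by have := hiL j hj; omega) (by omega)]
      -- now identify the RHS pieces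
      rw [hiBuild_flatten_split (i :: L) cr ce l (q - p) p q (by omega) (by omega)
        (fun s h1 h2 => by
          simp only [List.mem_cons, not_or]
          refine ⟨by omega, fun hs => by have := hiL _ hs; omega⟩)]
      rw [List.drop_eq_getElem_cons hqlen]
      simp only [hiBuild, List.flatten_cons]
      rw [if_pos (by rw [← hiq]; exact List.mem_cons_self ..)]
      rw [hiBuild_congr (i :: L) L cr ce _ ((q : Int) + 1)
        (fun t h1 _ => by
          simp only [List.mem_cons]
          constructor
          · rintro (rfl | ht); · omega
            · exact ht
          · exact Or.inr)]
      -- slice l p i = (l.drop p).take (q - p)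
      rw [hiq, PySem.List.slice_natCast]
      have hc : (PySem.List.pyGet? l (q : Int)).getD ' ' = l[q] := by
        rw [PySem.List.pyGet?_natCast]
        simp [List.getElem?_eq_getElem hqlen]
      rw [hc]
      have hcast : (q : Int) + 1 = ((q + 1 : Nat) : Int) := by push_cast; ring
      rw [hcast]
      simp [List.append_assoc]
    · rw [if_neg hg]
      rw [ih hP' p acc (fun j hj h0 => hge j (List.mem_cons_of_mem _ hj) h0) hp]
      rw [hiBuild_congr (i :: L) L cr ce _ (p : Int)
        (fun t h1 h2 => by
          simp only [List.length_drop] at h2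
          simp only [List.mem_cons]
          constructor
          · rintro (rfl | ht); · omega
            · exact ht
          · exact Or.inr)]

-- ===== VERDICT (by name: the statement is the Claim_ definition above) =====
theorem highlight_indices_spec : Claim_equal_highlight_indices := by
  intro sequence ixs color _
  unfold Spec_highlight_indices
  simp only [highlight_indices, highlight_indices_alt]
  rw [foldA_eq]
  have h := foldB_core
    ('\x1b' :: '[' :: (PySem.Int.toChars color ++ ['m'])) ['\x1b', '[', '0', 'm']
    sequence.toList (PySem.List.sorted (PySem.Set.ofList ixs) (fun x => x) false)
    (PySem.List.sorted_ofList_pairwise_lt ixs) 0 [] (fun _ _ h => h) (Nat.zero_le _)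
  simp only [Nat.cast_zero, List.drop_zero, List.flatten_nil, List.nil_append] at h
  rw [h]
  rw [hiBuild_congr ixs (PySem.List.sorted (PySem.Set.ofList ixs) (fun x => x) false)
    _ _ _ _ (fun t _ _ => by
      rw [PySem.List.mem_sorted, PySem.Set.mem_ofList])]
  simp
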